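-- pv_equiv track=rewrite | github.com/KEEMSY/book_club | backend/app/domains/reading/grade_policy.py | next_tier_threshold
-- ===== SOURCE A (Python) =====
-- TIER_THRESHOLDS: list[tuple[int, int, int, int]] = [
--     (1, 1, 0,   0),
--     (1, 2, 1,   2 * 3600),
--     (1, 3, 2,   6 * 3600),
--     (2, 1, 3,   10 * 3600),
--     (2, 2, 5,   20 * 3600),
--     (2, 3, 7,   35 * 3600),
--     (3, 1, 10,  50 * 3600),
--     (3, 2, 17,  83 * 3600),
--     (3, 3, 23,  117 * 3600),
--     (4, 1, 30,  150 * 3600),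
--     (4, 2, 53,  250 * 3600),
--     (4, 3, 77,  375 * 3600),
--     (5, 1, 100, 500 * 3600),
-- ]
--
-- def next_tier_threshold(
--     current_grade: int, current_tier: int
-- ) -> tuple[int, int] | None:
--     """Books and seconds needed to advance to the next tier.
--
--     Scans ``TIER_THRESHOLDS`` for the matching (grade, tier) row and returns
--     the requirements of the following row.  Returns ``None`` at the apex
--     (grade=5, tier=1) — there is no higher level.
--     """
--     for i, (g, t, _b, _s) in enumerate(TIER_THRESHOLDS):
--         if g == current_grade and t == current_tier:
--             if i + 1 < len(TIER_THRESHOLDS):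
--                 _, _, nb, ns = TIER_THRESHOLDS[i + 1]
--                 return (nb, ns)
--             return None
--     return None
-- ===== SOURCE B (Python) =====
-- # Requirement columns of TIER_THRESHOLDS, as parallel arrays indexed by
-- # the linear rank of a (grade, tier) state: rank = (grade-1)*3 + (tier-1).
-- _BOOKS   = [0, 1, 2, 3, 5, 7, 10, 17, 23, 30, 53, 77, 100]
-- _SECONDS = [0, 2 * 3600, 6 * 3600, 10 * 3600, 20 * 3600, 35 * 3600,
--             50 * 3600, 83 * 3600, 117 * 3600, 150 * 3600, 250 * 3600,
--             375 * 3600, 500 * 3600]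
--
-- def next_tier_threshold(
--     current_grade: int, current_tier: int
-- ) -> tuple[int, int] | None:
--     """Books and seconds needed to advance to the next tier (None at the apex
--     or for a state not in the progression)."""
--     if current_grade == 5 and current_tier == 1:
--         return None  # apex: no higher level
--     if not (1 <= current_grade <= 4 and 1 <= current_tier <= 3):
--         return None  # not a valid progression state
--     k = (current_grade - 1) * 3 + current_tier  # rank of the NEXT row
--     return (_BOOKS[k], _SECONDS[k])
-- ===== Notes on version B (the rewrite author's own statement) =====
-- stated objective: simpler
-- what changed: Replaced the table scan (enumerate + match + i+1 boundary check) with closed-form index arithmetic: the next row's rank is (grade-1)*3 + tier, looked up in two parallel requirement arrays after an explicit validity/apex check.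
import Mathlib
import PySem

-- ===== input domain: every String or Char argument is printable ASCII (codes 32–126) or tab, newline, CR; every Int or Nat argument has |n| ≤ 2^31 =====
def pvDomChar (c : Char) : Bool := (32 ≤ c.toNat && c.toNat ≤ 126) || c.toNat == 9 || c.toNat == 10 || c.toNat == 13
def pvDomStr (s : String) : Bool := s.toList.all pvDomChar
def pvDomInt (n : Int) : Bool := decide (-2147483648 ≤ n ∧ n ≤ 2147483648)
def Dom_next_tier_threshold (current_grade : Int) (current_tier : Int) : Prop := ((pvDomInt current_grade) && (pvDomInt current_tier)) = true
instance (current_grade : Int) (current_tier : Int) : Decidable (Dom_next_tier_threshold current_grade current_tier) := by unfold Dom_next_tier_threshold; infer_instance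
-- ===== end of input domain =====

-- B replaces A's table scan by closed-form index arithmetic ((grade-1)*3 + tier) into
-- parallel requirement arrays, after an explicit apex/validity check; objective: simpler.

-- ===== PORT A =====
def tierThresholds : List (Int × Int × Int × Int) :=
  [(1, 1, 0, 0), (1, 2, 1, 7200), (1, 3, 2, 21600), (2, 1, 3, 36000),
   (2, 2, 5, 72000), (2, 3, 7, 126000), (3, 1, 10, 180000), (3, 2, 17, 298800),
   (3, 3, 23, 421200), (4, 1, 30, 540000), (4, 2, 53, 900000), (4, 3, 77, 1380000),
   (5, 1, 100, 1800000)]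

-- the 'for i, (g, t, _b, _s) in enumerate(TIER_THRESHOLDS)' loop, row by row
def nextTierLoop (current_grade current_tier : Int) :
    List (Int × (Int × Int × Int × Int)) → Option (Int × Int)
  | [] => none
  | (i, (g, t, _b, _s)) :: rest =>
    if g = current_grade ∧ t = current_tier then
      if i + 1 < (tierThresholds.length : Int) then
        match PySem.List.pyGet? tierThresholds (i + 1) with
        | some (_, _, nb, ns) => some (nb, ns)
        | none => none  -- unreachable: guarded by i+1 < len
      else none
    else nextTierLoop current_grade current_tier rest

def next_tier_threshold (current_grade : Int) (current_tier : Int) : Option (Int × Int) :=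
  nextTierLoop current_grade current_tier (PySem.List.enumerate tierThresholds)

-- ===== PORT B =====
def booksArr : List Int := [0, 1, 2, 3, 5, 7, 10, 17, 23, 30, 53, 77, 100]
def secondsArr : List Int :=
  [0, 7200, 21600, 36000, 72000, 126000, 180000, 298800, 421200, 540000, 900000, 1380000, 1800000]

def next_tier_threshold_alt (current_grade : Int) (current_tier : Int) : Option (Int × Int) :=
  if current_grade = 5 ∧ current_tier = 1 then none
  else if 1 ≤ current_grade ∧ current_grade ≤ 4 ∧ 1 ≤ current_tier ∧ current_tier ≤ 3 then
    let k := (current_grade - 1) * 3 + current_tier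
    -- _BOOKS[k], _SECONDS[k]: in range whenever the guard holds
    match PySem.List.pyGet? booksArr k, PySem.List.pyGet? secondsArr k with
    | some nb, some ns => some (nb, ns)
    | _, _ => none
  else none

-- ===== PRECONDITION & SPEC =====
def Spec_next_tier_threshold (current_grade : Int) (current_tier : Int) (out : Option (Int × Int)) : Prop := out = next_tier_threshold_alt current_grade current_tier
instance (current_grade : Int) (current_tier : Int) (out : Option (Int × Int)) : Decidable (Spec_next_tier_threshold current_grade current_tier out) := by unfold Spec_next_tier_threshold; infer_instance

-- ===== CLAIM (what is proved, stated in full; the proofs are below) =====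
def Claim_equal_next_tier_threshold : Prop := ∀ (current_grade : Int) (current_tier : Int), Dom_next_tier_threshold current_grade current_tier → Spec_next_tier_threshold current_grade current_tier (next_tier_threshold current_grade current_tier)

-- ===== LEMMAS AND PROOFS =====

set_option maxHeartbeats 1000000 in
theorem enum_lit : PySem.List.enumerate tierThresholds = [(0, (1, 1, 0, 0)), (1, (1, 2, 1, 7200)), (2, (1, 3, 2, 21600)), (3, (2, 1, 3, 36000)), (4, (2, 2, 5, 72000)), (5, (2, 3, 7, 126000)), (6, (3, 1, 10, 180000)), (7, (3, 2, 17, 298800)), (8, (3, 3, 23, 421200)), (9, (4, 1, 30, 540000)), (10, (4, 2, 53, 900000)), (11, (4, 3, 77, 1380000)), (12, (5, 1, 100, 1800000))] := by rfl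

-- ===== VERDICT (by name: the statement is the Claim_ definition above) =====
set_option maxHeartbeats 1000000 in
theorem next_tier_threshold_spec : Claim_equal_next_tier_threshold := by
  intro g t _
  unfold Spec_next_tier_threshold
  by_cases h0 : (1 : Int) = g ∧ (1 : Int) = t
  · obtain ⟨hg, ht⟩ := h0; subst hg; subst ht; decide
  by_cases h1 : (1 : Int) = g ∧ (2 : Int) = t
  · obtain ⟨hg, ht⟩ := h1; subst hg; subst ht; decide
  by_cases h2 : (1 : Int) = g ∧ (3 : Int) = t
  · obtain ⟨hg, ht⟩ := h2; subst hg; subst ht; decide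
  by_cases h3 : (2 : Int) = g ∧ (1 : Int) = t
  · obtain ⟨hg, ht⟩ := h3; subst hg; subst ht; decide
  by_cases h4 : (2 : Int) = g ∧ (2 : Int) = t
  · obtain ⟨hg, ht⟩ := h4; subst hg; subst ht; decide
  by_cases h5 : (2 : Int) = g ∧ (3 : Int) = t
  · obtain ⟨hg, ht⟩ := h5; subst hg; subst ht; decide
  by_cases h6 : (3 : Int) = g ∧ (1 : Int) = t
  · obtain ⟨hg, ht⟩ := h6; subst hg; subst ht; decide
  by_cases h7 : (3 : Int) = g ∧ (2 : Int) = t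
  · obtain ⟨hg, ht⟩ := h7; subst hg; subst ht; decide
  by_cases h8 : (3 : Int) = g ∧ (3 : Int) = t
  · obtain ⟨hg, ht⟩ := h8; subst hg; subst ht; decide
  by_cases h9 : (4 : Int) = g ∧ (1 : Int) = t
  · obtain ⟨hg, ht⟩ := h9; subst hg; subst ht; decide
  by_cases h10 : (4 : Int) = g ∧ (2 : Int) = t
  · obtain ⟨hg, ht⟩ := h10; subst hg; subst ht; decide
  by_cases h11 : (4 : Int) = g ∧ (3 : Int) = t
  · obtain ⟨hg, ht⟩ := h11; subst hg; subst ht; decide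
  by_cases h12 : (5 : Int) = g ∧ (1 : Int) = t
  · obtain ⟨hg, ht⟩ := h12; subst hg; subst ht; decide
  -- outside the table: A's scan falls through; B's bounds guard rejects
  have hA : next_tier_threshold g t = none := by
    simp only [next_tier_threshold, enum_lit, nextTierLoop,
      if_neg h0, if_neg h1, if_neg h2, if_neg h3, if_neg h4, if_neg h5, if_neg h6,
      if_neg h7, if_neg h8, if_neg h9, if_neg h10, if_neg h11, if_neg h12]
  have hB : next_tier_threshold_alt g t = none := by
    have hap : ¬ (g = 5 ∧ t = 1) := by omega
    have hrng : ¬ (1 ≤ g ∧ g ≤ 4 ∧ 1 ≤ t ∧ t ≤ 3) := by omega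
    simp only [next_tier_threshold_alt, if_neg hap, if_neg hrng]
  rw [hA, hB]
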